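-- pv_equiv track=rewrite | github.com/ranchimall/flodata-tester | parse-mod.py | extractOperation
-- ===== SOURCE A (Python) =====
-- def extractOperation(text, operationList):
--     count = 0
--     returnval = None
--     text = text.lower()
--     for operation in operationList:
--         operation = operation.lower()
--
--         count = count + text.count(operation)
--         if count > 1:
--             return 'od'
--         if count == 1 and (returnval is None):
--             returnval = operation
--     return returnval
-- ===== SOURCE B (Python) =====
-- def _hits(t, operationList):
--     # lazily yield one lowered operation per non-overlapping occurrence in t
--     for op in operationList:
--         op = op.lower()
--         pos = 0
--         while True:
--             j = t.find(op, pos)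
--             if j < 0:
--                 break
--             yield op
--             pos = j + (len(op) or 1)
--
--
-- def extractOperation(text, operationList):
--     it = _hits(text.lower(), operationList)
--     first = next(it, None)
--     if first is None:
--         return None
--     return 'od' if next(it, None) is not None else first
-- ===== Notes on version B (the rewrite author's own statement) =====
-- stated objective: alternative
-- what changed: Replaces A's per-operation str.count calls folded into a numeric accumulator with early 'od' exits by a lazy generator of occurrence events (repeated str.find with a moving start position) whose first two elements alone decide None / the single operation / 'od'.
import Mathlib
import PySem

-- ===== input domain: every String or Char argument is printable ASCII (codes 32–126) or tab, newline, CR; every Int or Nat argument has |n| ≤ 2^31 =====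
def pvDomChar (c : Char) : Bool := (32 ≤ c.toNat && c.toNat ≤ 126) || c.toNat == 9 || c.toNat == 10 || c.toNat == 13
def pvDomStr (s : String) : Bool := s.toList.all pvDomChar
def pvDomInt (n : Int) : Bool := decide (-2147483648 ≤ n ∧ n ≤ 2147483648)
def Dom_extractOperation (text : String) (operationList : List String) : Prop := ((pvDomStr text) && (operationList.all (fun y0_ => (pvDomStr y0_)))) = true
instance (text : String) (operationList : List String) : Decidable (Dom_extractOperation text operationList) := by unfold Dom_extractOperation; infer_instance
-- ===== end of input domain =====

-- B replaces A's per-operation str.count accumulator loop by a lazy stream of occurrence events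
-- (find-based generator) inspected only at its first two elements (alternative decomposition, same cost).


-- ===== PORT A =====
-- A's for-loop with accumulator `count` and `returnval`, early-returning 'od'
def extractOperationGo (t : String) (ops : List String) (count : Int) (returnval : Option String) : Option String :=
  match ops with
  | [] => returnval
  | op :: rest =>
    let opl := PySem.Str.lower op
    let count' := count + (PySem.Str.count t opl : Int)
    if count' > 1 then some "od"
    else if count' = 1 ∧ returnval = none then extractOperationGo t rest count' (some opl)
    else extractOperationGo t rest count' returnval

def extractOperation (text : String) (operationList : List String) : Option String :=
  extractOperationGo (PySem.Str.lower text) operationList 0 none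

-- ===== PORT B =====
-- Source B's generator `_hits`: the inner `while True: j = t.find(op, pos) …` loop, one yielded
-- element per found occurrence; ported with fuel t.length+1 (the position strictly increases
-- each round and find returns -1 past the end, so this fuel is never exhausted before -1).
def pvHitsGo (t op : String) (fuel : Nat) (pos : Int) : List String :=
  match fuel with
  | 0 => []
  | f + 1 =>
    let j := PySem.Str.findFrom t op pos none
    if j < 0 then []
    else op :: pvHitsGo t op f (j + (if PySem.Str.len op = 0 then 1 else PySem.Str.len op))

-- the generator's outer `for op in operationList` (its yields, concatenated in order)
def pvHits (t : String) (ops : List String) : List String :=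
  ops.flatMap (fun op =>
    let opl := PySem.Str.lower op
    pvHitsGo t opl (t.toList.length + 1) 0)

-- Source B's consumer: first = next(it, None); None / 'od' if a second event exists / the single event
def extractOperation_alt (text : String) (operationList : List String) : Option String :=
  match pvHits (PySem.Str.lower text) operationList with
  | [] => none
  | [x] => some x
  | _ :: _ :: _ => some "od"

-- ===== PRECONDITION & SPEC =====
def Spec_extractOperation (text : String) (operationList : List String) (out : Option String) : Prop := out = extractOperation_alt text operationList
instance (text : String) (operationList : List String) (out : Option String) : Decidable (Spec_extractOperation text operationList out) := by unfold Spec_extractOperation; infer_instance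

-- ===== CLAIM (what is proved, stated in full; the proofs are below) =====
def Claim_equal_extractOperation : Prop := ∀ (text : String) (operationList : List String), Dom_extractOperation text operationList → Spec_extractOperation text operationList (extractOperation text operationList)

-- ===== LEMMAS AND PROOFS =====

-- proof-side restatement of non-overlapping substring counting (PySem.Chars.count for a
-- nonempty needle c::cs), by well-founded recursion on the haystack
def countF (c : Char) (cs : List Char) : List Char → Nat
  | [] => 0
  | h :: t =>
    if (c :: cs).isPrefixOf (h :: t) then countF c cs (t.drop cs.length) + 1 else countF c cs t
termination_by s => s.length
decreasing_by
  · simp only [List.length_cons]; have := List.length_drop (l := t) (i := cs.length); omega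
  · simp

lemma count_go_cons (sub : List Char) (f : Nat) (h : Char) (t : List Char) (acc : Nat) :
    PySem.Chars.count.go sub (f+1) (h::t) acc =
      if sub.isPrefixOf (h::t) then PySem.Chars.count.go sub f ((h::t).drop sub.length) (acc+1)
      else PySem.Chars.count.go sub f t acc := by
  rw [PySem.Chars.count.go]

lemma count_go_eq (c : Char) (cs : List Char) :
    ∀ (fuel : Nat) (s : List Char) (acc : Nat), s.length ≤ fuel →
      PySem.Chars.count.go (c :: cs) fuel s acc = acc + countF c cs s := by
  intro fuel
  induction fuel with
  | zero =>
    intro s acc hlen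
    have : s = [] := List.length_eq_zero_iff.mp (Nat.le_zero.mp hlen)
    subst this
    rw [PySem.Chars.count.go]; simp [countF]
  | succ f ih =>
    intro s acc hlen
    cases s with
    | nil =>
      rw [PySem.Chars.count.go]
      · simp [countF]
      · omega
    | cons h t =>
      rw [count_go_cons]
      by_cases hp : (c :: cs).isPrefixOf (h :: t)
      · rw [if_pos hp]
        have hd : (h :: t).drop (c :: cs).length = t.drop cs.length := by
          simp [List.length_cons]
        rw [hd, ih _ _ (by have := List.length_drop (l := t) (i := cs.length); simp at hlen ⊢; omega)]
        simp [countF, hp]; omega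
      · rw [if_neg hp, ih _ _ (by simp at hlen ⊢; omega)]
        simp [countF, hp]

lemma count_eq_countF (s : List Char) (c : Char) (cs : List Char) :
    PySem.Chars.count s (c :: cs) = countF c cs s := by
  rw [PySem.Chars.count]
  simp [count_go_eq c cs s.length s 0 le_rfl]

lemma countF_zero {s : List Char} {c : Char} {cs : List Char}
    (h : ¬ (c :: cs) <:+: s) : countF c cs s = 0 := by
  induction s with
  | nil => simp [countF]
  | cons hd tl ih =>
    rw [countF]
    rw [if_neg (by
      intro hp
      exact h (List.IsPrefix.isInfix (List.isPrefixOf_iff_prefix.mp hp)))]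
    exact ih (fun hi => h (hi.trans (List.suffix_cons hd tl).isInfix))

lemma find_unique {s sub : List Char} {j : Nat}
    (h1 : sub <+: s.drop j) (h2 : ∀ i < j, ¬ sub <+: s.drop i) :
    PySem.Chars.find s sub = j := by
  have hin : PySem.Chars.isIn sub s = true :=
    (PySem.Chars.exists_prefix_drop_iff_isIn sub s).mp ⟨j, h1⟩
  have hnn : 0 ≤ PySem.Chars.find s sub := by
    rcases (PySem.Chars.find_nonneg_iff s sub) with ⟨_, hb⟩
    exact hb ((PySem.Chars.isIn_iff_infix sub s).mp hin)
  obtain ⟨hpref, hmin⟩ := PySem.Chars.find_spec hnn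
  have h1' : ¬ (PySem.Chars.find s sub).toNat < j := fun hlt => (h2 _ hlt) hpref
  have h2' : ¬ j < (PySem.Chars.find s sub).toNat := fun hlt => (hmin _ hlt) h1
  omega

lemma find_cons {h : Char} {t sub : List Char} (hp : ¬ sub <+: (h :: t)) :
    PySem.Chars.find (h :: t) sub =
      if PySem.Chars.find t sub = -1 then -1 else PySem.Chars.find t sub + 1 := by
  by_cases hft : PySem.Chars.find t sub = -1
  · rw [if_pos hft]
    rw [PySem.Chars.find_eq_neg_one_iff] at hft ⊢
    intro hin
    rcases (List.infix_cons_iff).mp hin with hp' | hin'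
    · exact hp hp'
    · exact hft hin'
  · rw [if_neg hft]
    have hnn : 0 ≤ PySem.Chars.find t sub := by
      have := PySem.Chars.neg_one_le_find t sub
      omega
    obtain ⟨hpref, hmin⟩ := PySem.Chars.find_spec hnn
    have := find_unique (s := h :: t) (j := (PySem.Chars.find t sub).toNat + 1)
      (by simpa using hpref)
      (by
        intro i hi
        cases i with
        | zero => simpa using hp
        | succ i' => simpa using hmin i' (by omega))
    omega

lemma countF_step (c : Char) (cs : List Char) (s : List Char) :
    countF c cs s =
      if PySem.Chars.find s (c :: cs) = -1 then 0
      else countF c cs (s.drop ((PySem.Chars.find s (c :: cs)).toNat + (cs.length + 1))) + 1 := by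
  induction s with
  | nil =>
    rw [if_pos]
    · simp [countF]
    · rw [PySem.Chars.find_eq_neg_one_iff]
      simp
  | cons h t ih =>
    by_cases hp : (c :: cs) <+: (h :: t)
    · have hf0 : PySem.Chars.find (h :: t) (c :: cs) = 0 :=
        find_unique (j := 0) (by simpa using hp) (by omega)
      rw [hf0]
      rw [if_neg (by norm_num)]
      rw [countF, if_pos (List.isPrefixOf_iff_prefix.mpr hp)]
      simp
    · have hcF : countF c cs (h :: t) = countF c cs t := by
        rw [countF, if_neg (by simpa [List.isPrefixOf_iff_prefix] using hp)]
      rw [hcF, find_cons hp]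
      by_cases hft : PySem.Chars.find t (c :: cs) = -1
      · rw [if_pos hft]
        rw [ih, if_pos hft]
        norm_num
      · have hnn : 0 ≤ PySem.Chars.find t (c :: cs) := by
          have := PySem.Chars.neg_one_le_find t (c :: cs)
          omega
        rw [if_neg hft, if_neg (by omega)]
        rw [ih, if_neg hft]
        congr 2
        have h1 : (PySem.Chars.find t (c :: cs) + 1).toNat
            = (PySem.Chars.find t (c :: cs)).toNat + 1 := by omega
        have h2 : (PySem.Chars.find t (c :: cs)).toNat + 1 + (cs.length + 1)
            = ((PySem.Chars.find t (c :: cs)).toNat + (cs.length + 1)) + 1 := by omega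
        rw [h1, h2, List.drop_succ_cons]

lemma findFrom_past (s sub : List Char) (st : Int) (h : (s.length : Int) < st) :
    PySem.Chars.findFrom s sub st none = -1 := by
  rw [PySem.Chars.findFrom]
  have hst : ¬ st < 0 := by omega
  rw [if_neg hst, if_pos (by omega)]

-- the scanner for a nonempty needle: one yield per non-overlapping occurrence from position k
lemma hitsGo_nonempty (t sub : String) (c : Char) (cs : List Char) (hsub : sub.toList = c :: cs) :
    ∀ (fuel k : Nat), k ≤ t.toList.length → t.toList.length + 1 ≤ fuel + k →
      pvHitsGo t sub fuel (k : Int) =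
        List.replicate (countF c cs (t.toList.drop k)) sub := by
  intro fuel
  induction fuel with
  | zero => intro k hk hfuel; omega
  | succ f ih =>
    intro k hk hfuel
    rw [pvHitsGo]
    simp only [PySem.Str.findFrom_eq, PySem.Str.len_eq, hsub]
    rw [PySem.Chars.findFrom_natCast t.toList (c :: cs) k hk]
    by_cases hf : PySem.Chars.find (t.toList.drop k) (c :: cs) = -1
    · rw [if_pos hf, if_pos (by norm_num)]
      rw [countF_zero ((PySem.Chars.find_eq_neg_one_iff _ _).mp hf)]
      simp
    · have hnn : 0 ≤ PySem.Chars.find (t.toList.drop k) (c :: cs) := by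
        have := PySem.Chars.neg_one_le_find (t.toList.drop k) (c :: cs)
        omega
      rw [if_neg hf]
      rw [if_neg (by omega)]
      obtain ⟨hpref, _⟩ := PySem.Chars.find_spec hnn
      have hlenp : cs.length + 1 ≤ (t.toList.drop k).length
          - (PySem.Chars.find (t.toList.drop k) (c :: cs)).toNat := by
        have h1 := hpref.length_le
        simp [List.length_drop] at h1 ⊢
        omega
      have hdlen : (t.toList.drop k).length = t.toList.length - k := List.length_drop
      rw [if_neg (show ¬(((c :: cs).length : Int) = 0) by simp only [List.length_cons]; push_cast; omega)]
      have hcast : ((k : Int) + PySem.Chars.find (t.toList.drop k) (c :: cs) + ((c :: cs).length : Int))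
          = ((k + (PySem.Chars.find (t.toList.drop k) (c :: cs)).toNat + (cs.length + 1) : Nat) : Int) := by
        simp [List.length_cons]
        omega
      rw [hcast]
      rw [ih (k + (PySem.Chars.find (t.toList.drop k) (c :: cs)).toNat + (cs.length + 1))
        (by omega) (by omega)]
      have hdd : List.drop ((PySem.Chars.find (t.toList.drop k) (c :: cs)).toNat + (cs.length + 1))
            (t.toList.drop k)
          = List.drop (k + (PySem.Chars.find (t.toList.drop k) (c :: cs)).toNat + (cs.length + 1))
            t.toList := by
        rw [List.drop_drop]
        congr 1
        omega
      conv_rhs => rw [countF_step c cs (t.toList.drop k)]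
      rw [if_neg hf, hdd, List.replicate_succ]

lemma hitsGo_past (t sub : String) (fuel : Nat) (k : Int) (h : (t.toList.length : Int) < k) :
    pvHitsGo t sub fuel k = [] := by
  cases fuel with
  | zero => rfl
  | succ f =>
    rw [pvHitsGo]
    simp only [PySem.Str.findFrom_eq]
    rw [findFrom_past _ _ _ h]
    norm_num

lemma hitsGo_empty (t sub : String) (hsub : sub.toList = []) :
    ∀ (fuel k : Nat), k ≤ t.toList.length → t.toList.length + 1 ≤ fuel + k →
      pvHitsGo t sub fuel (k : Int) =
        List.replicate (t.toList.length - k + 1) sub := by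
  intro fuel
  induction fuel with
  | zero => intro k hk hfuel; omega
  | succ f ih =>
    intro k hk hfuel
    rw [pvHitsGo]
    simp only [PySem.Str.findFrom_eq, PySem.Str.len_eq, hsub]
    rw [PySem.Chars.findFrom_natCast t.toList [] k hk]
    rw [PySem.Chars.find_nil]
    rw [if_neg (by norm_num), if_neg (by omega)]
    rw [if_pos (by simp)]
    have hpos : ((k : Int) + 0 + 1) = ((k + 1 : Nat) : Int) := by push_cast; ring
    rw [hpos]
    by_cases hend : k = t.toList.length
    · rw [hitsGo_past t sub f _ (by omega)]
      subst hend
      simp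
    · rw [ih (k + 1) (by omega) (by omega)]
      have : t.toList.length - k + 1 = (t.toList.length - (k + 1) + 1) + 1 := by omega
      rw [this]
      simp [List.replicate_succ]

-- the whole stream is the per-operation counts, rendered as replicated events
lemma pvHits_eq (t : String) (ops : List String) :
    pvHits t ops =
      ops.flatMap (fun op =>
        List.replicate (PySem.Str.count t (PySem.Str.lower op)) (PySem.Str.lower op)) := by
  have helper : ∀ op : String,
      pvHitsGo t (PySem.Str.lower op) (t.toList.length + 1) 0
        = List.replicate (PySem.Str.count t (PySem.Str.lower op)) (PySem.Str.lower op) := by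
    intro op
    rcases h : (PySem.Str.lower op).toList with _ | ⟨c, cs⟩
    · have he := hitsGo_empty t _ h (t.toList.length + 1) 0 (by omega) (by omega)
      simp only [Nat.cast_zero, Nat.sub_zero] at he
      rw [he, PySem.Str.count_eq, h, PySem.Chars.count]
      simp
    · have hn := hitsGo_nonempty t _ c cs h (t.toList.length + 1) 0 (by omega) (by omega)
      simp only [Nat.cast_zero, List.drop_zero] at hn
      rw [hn, PySem.Str.count_eq, h, count_eq_countF]
  induction ops with
  | nil => rfl
  | cons op rest ih =>
    simp only [pvHits, List.flatMap_cons] at ih ⊢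
    rw [ih, helper]

-- A's loop from the saturated state (count = 1, returnval set)
lemma go_one (t : String) (x : String) : ∀ (ops : List String),
    extractOperationGo t ops 1 (some x) =
      if ops.flatMap (fun op =>
          List.replicate (PySem.Str.count t (PySem.Str.lower op)) (PySem.Str.lower op)) = []
      then some x else some "od" := by
  intro ops
  induction ops with
  | nil => simp [extractOperationGo]
  | cons op rest ih =>
    rw [extractOperationGo]
    simp only [List.flatMap_cons]
    by_cases hc : PySem.Str.count t (PySem.Str.lower op) = 0
    · rw [hc]
      rw [if_neg (by norm_num), if_neg (by simp)]
      rw [show ((1 : Int) + ((0 : Nat) : Int)) = 1 by norm_num]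
      rw [show (List.replicate (0 : Nat) (PySem.Str.lower op)) = ([] : List String) from rfl,
        List.nil_append]
      exact ih
    · rw [if_pos (by omega)]
      rw [if_neg (by
        intro hnil
        have hlen := congrArg List.length hnil
        rw [List.length_append, List.length_replicate, List.length_nil] at hlen
        omega)]

-- A's loop from the initial state, against the event stream
lemma go_zero (t : String) : ∀ (ops : List String),
    extractOperationGo t ops 0 none =
      match ops.flatMap (fun op =>
          List.replicate (PySem.Str.count t (PySem.Str.lower op)) (PySem.Str.lower op)) with
      | [] => none
      | [x] => some x
      | _ :: _ :: _ => some "od" := by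
  intro ops
  induction ops with
  | nil => simp [extractOperationGo]
  | cons op rest ih =>
    rw [extractOperationGo]
    simp only [List.flatMap_cons]
    by_cases hc : PySem.Str.count t (PySem.Str.lower op) = 0
    · rw [hc]
      rw [if_neg (by norm_num), if_neg (by norm_num)]
      rw [show ((0 : Int) + ((0 : Nat) : Int)) = 0 by norm_num]
      rw [show (List.replicate (0 : Nat) (PySem.Str.lower op)) = ([] : List String) from rfl,
        List.nil_append]
      exact ih
    · by_cases hc1 : PySem.Str.count t (PySem.Str.lower op) = 1
      · rw [hc1]
        rw [if_neg (by norm_num), if_pos (by norm_num)]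
        rw [show ((0 : Int) + ((1 : Nat) : Int)) = 1 by norm_num]
        rw [go_one]
        rw [show (List.replicate (1 : Nat) (PySem.Str.lower op)) = [PySem.Str.lower op] from rfl]
        rcases hrest : rest.flatMap (fun op =>
            List.replicate (PySem.Str.count t (PySem.Str.lower op)) (PySem.Str.lower op)) with _ | ⟨y, ys⟩
        · rw [if_pos rfl]
          rfl
        · rw [if_neg (by simp)]
          rfl
      · rw [if_pos (by omega)]
        obtain ⟨m, hm⟩ : ∃ m, PySem.Str.count t (PySem.Str.lower op) = m + 2 :=
          ⟨PySem.Str.count t (PySem.Str.lower op) - 2, by omega⟩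
        rw [hm]
        simp only [List.replicate_succ, List.cons_append]

-- ===== VERDICT (by name: the statement is the Claim_ definition above) =====
theorem extractOperation_spec : Claim_equal_extractOperation := by
  intro text operationList _
  unfold Spec_extractOperation extractOperation extractOperation_alt
  rw [pvHits_eq, go_zero]
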